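-- pv_equiv track=rewrite | github.com/dunkmann00/Monopoly-Probabilities | app/utils.py | calculate_all_turns
-- ===== SOURCE A (Python) =====
-- def calculate_all_turns(total_turns, cpu_count):
--     turns = []
--     turns_remaining = total_turns
--     turns_per_game = max(1000000, total_turns//cpu_count)
--
--     while len(turns) < cpu_count and turns_remaining > 0:
--         game_turns = min(turns_per_game, turns_remaining)
--         turns.append(game_turns)
--         turns_remaining-=game_turns
--
--     for i in range(len(turns)):
--         if turns_remaining == 0:
--             break
--         turns[i]+=1
--         turns_remaining-=1
--     return turns
-- ===== SOURCE B (Python) =====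
-- def calculate_all_turns(total_turns, cpu_count):
--     turns_per_game = max(1000000, total_turns // cpu_count)
--     if total_turns <= 0 or cpu_count <= 0:
--         return []
--     q, r = divmod(total_turns, turns_per_game)
--     if q < cpu_count:
--         return [turns_per_game] * q + ([r] if r > 0 else [])
--     extra = total_turns - cpu_count * turns_per_game
--     return [turns_per_game + 1] * extra + [turns_per_game] * (cpu_count - extra)
-- ===== Notes on version B (the rewrite author's own statement) =====
-- stated objective: simpler
-- what changed: Replaced the while-accumulation loop and the +1-distribution for-loop by a closed form: divmod(total_turns, turns_per_game) decides whether the work fits in fewer than cpu_count chunks (full chunks plus an optional remainder chunk) or exactly cpu_count chunks with the remainder distributed as +1 on a prefix, all built with list-replication.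
import Mathlib
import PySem

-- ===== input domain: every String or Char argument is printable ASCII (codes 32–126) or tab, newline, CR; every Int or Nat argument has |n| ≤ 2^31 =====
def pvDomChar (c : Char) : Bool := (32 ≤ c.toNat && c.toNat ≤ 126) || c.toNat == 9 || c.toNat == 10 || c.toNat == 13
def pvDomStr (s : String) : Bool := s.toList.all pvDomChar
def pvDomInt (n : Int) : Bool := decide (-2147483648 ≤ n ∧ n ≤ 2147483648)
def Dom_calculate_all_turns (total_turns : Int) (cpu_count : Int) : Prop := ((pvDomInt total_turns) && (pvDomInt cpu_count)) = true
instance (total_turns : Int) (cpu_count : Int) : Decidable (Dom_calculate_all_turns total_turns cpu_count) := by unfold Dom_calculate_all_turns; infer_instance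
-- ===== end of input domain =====

-- B replaces A's two accumulation loops by a divmod-based closed form (simpler; same cost to build the list).

-- `turns_per_game = max(1000000, total_turns//cpu_count)` — the identical first line of both Pythons
def pvTurnsPerGame (total_turns : Int) (cpu_count : Int) : Int :=
  max 1000000 (PySem.Int.floordiv total_turns cpu_count)

-- ===== PORT A =====
-- the `while len(turns) < cpu_count and turns_remaining > 0:` loop
def pvLoopA (cpu_count tpg : Int) (turns : List Int) (rem : Int) : List Int × Int :=
  if (turns.length : Int) < cpu_count ∧ 0 < rem then
    pvLoopA cpu_count tpg (turns ++ [min tpg rem]) (rem - min tpg rem)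
  else (turns, rem)
termination_by (cpu_count - turns.length).toNat
decreasing_by simp; omega

-- the `for i in range(len(turns)): if turns_remaining == 0: break; turns[i]+=1; …` loop
def pvLoopB : List Int → Int → List Int
  | [], _ => []
  | t :: ts, rem => if rem = 0 then t :: ts else (t + 1) :: pvLoopB ts (rem - 1)

def calculate_all_turns (total_turns : Int) (cpu_count : Int) : List Int :=
  pvLoopB (pvLoopA cpu_count (pvTurnsPerGame total_turns cpu_count) [] total_turns).1
          (pvLoopA cpu_count (pvTurnsPerGame total_turns cpu_count) [] total_turns).2

-- ===== PORT B =====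
def calculate_all_turns_alt (total_turns : Int) (cpu_count : Int) : List Int :=
  if total_turns ≤ 0 ∨ cpu_count ≤ 0 then []
  else if PySem.Int.floordiv total_turns (pvTurnsPerGame total_turns cpu_count) < cpu_count then
    List.replicate (PySem.Int.floordiv total_turns (pvTurnsPerGame total_turns cpu_count)).toNat
        (pvTurnsPerGame total_turns cpu_count) ++
      (if 0 < PySem.Int.mod total_turns (pvTurnsPerGame total_turns cpu_count) then
        [PySem.Int.mod total_turns (pvTurnsPerGame total_turns cpu_count)] else [])
  else
    List.replicate (total_turns - cpu_count * pvTurnsPerGame total_turns cpu_count).toNat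
        (pvTurnsPerGame total_turns cpu_count + 1) ++
      List.replicate (cpu_count - (total_turns - cpu_count * pvTurnsPerGame total_turns cpu_count)).toNat
        (pvTurnsPerGame total_turns cpu_count)

-- ===== PRECONDITION & SPEC =====
-- Pre_ excludes only cpu_count = 0, where Python A raises ZeroDivisionError (B raises there too).
def Pre_calculate_all_turns (total_turns : Int) (cpu_count : Int) : Prop := cpu_count ≠ 0
instance (total_turns : Int) (cpu_count : Int) : Decidable (Pre_calculate_all_turns total_turns cpu_count) := by unfold Pre_calculate_all_turns; infer_instance
def pvWitness_calculate_all_turns : Int × Int := (5000000, 3)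

def Spec_calculate_all_turns (total_turns : Int) (cpu_count : Int) (out : List Int) : Prop := out = calculate_all_turns_alt total_turns cpu_count
instance (total_turns : Int) (cpu_count : Int) (out : List Int) : Decidable (Spec_calculate_all_turns total_turns cpu_count out) := by unfold Spec_calculate_all_turns; infer_instance

-- ===== CLAIM (what is proved, stated in full; the proofs are below) =====
def Claim_equal_calculate_all_turns : Prop := ∀ (total_turns : Int) (cpu_count : Int), Dom_calculate_all_turns total_turns cpu_count → Pre_calculate_all_turns total_turns cpu_count → Spec_calculate_all_turns total_turns cpu_count (calculate_all_turns total_turns cpu_count)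

-- ===== LEMMAS AND PROOFS =====

-- pvLoopB does nothing when the remainder is 0
theorem pvLoopB_zero (ts : List Int) : pvLoopB ts 0 = ts := by
  cases ts <;> simp [pvLoopB]

-- pvLoopB on a replicated list with 0 ≤ r ≤ n: a +1 prefix of length r
theorem pvLoopB_replicate (n : Nat) (x r : Int) (h0 : 0 ≤ r) (h1 : r ≤ (n : Int)) :
    pvLoopB (List.replicate n x) r =
      List.replicate r.toNat (x + 1) ++ List.replicate (n - r.toNat) x := by
  induction n generalizing r with
  | zero =>
    have : r = 0 := by omega
    simp [this, pvLoopB]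
  | succ m ih =>
    by_cases hr : r = 0
    · simp [hr, pvLoopB_zero]
    · rw [List.replicate_succ, pvLoopB, if_neg hr, ih (r - 1) (by omega) (by omega)]
      have hrt : r.toNat = (r - 1).toNat + 1 := by omega
      rw [hrt, List.replicate_succ]
      simp

-- Under-capacity regime: rem = q·tpg + r fits in the free slots ⇒ the while loop packs
-- q full chunks plus a final chunk r (if positive), leaving remainder 0
theorem pvLoopA_under (tpg : Int) (htpg : 0 < tpg) (cpu : Int) :
    ∀ (q : Nat) (r : Int) (turns : List Int), 0 ≤ r → r < tpg →
      (q : Int) * tpg + r ≤ (cpu - turns.length) * tpg →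
      pvLoopA cpu tpg turns ((q : Int) * tpg + r) =
        (turns ++ List.replicate q tpg ++ (if 0 < r then [r] else []), 0) := by
  intro q
  induction q with
  | zero =>
    intro r turns hr0 hr1 hcap
    simp only [Nat.cast_zero, zero_mul, zero_add] at hcap ⊢
    by_cases hr : 0 < r
    · have hlen : (turns.length : Int) < cpu := by nlinarith
      rw [pvLoopA, if_pos ⟨hlen, hr⟩]
      have hmin : min tpg r = r := by omega
      rw [hmin]
      have hstop : pvLoopA cpu tpg (turns ++ [r]) (r - r) = (turns ++ [r], r - r) := by
        rw [pvLoopA]; simp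
      rw [hstop, if_pos hr]
      simp
    · have hr' : r = 0 := by omega
      subst hr'
      rw [pvLoopA]
      simp
  | succ m ih =>
    intro r turns hr0 hr1 hcap
    have hm0 : (0 : Int) ≤ (m : Int) := by positivity
    have hrem : 0 < ((m + 1 : Nat) : Int) * tpg + r := by push_cast; nlinarith
    have hlen : (turns.length : Int) < cpu := by
      by_contra hc
      push_neg at hc
      have : (cpu - (turns.length : Int)) * tpg ≤ 0 := by nlinarith
      push_cast at hcap
      nlinarith
    rw [pvLoopA, if_pos ⟨hlen, hrem⟩]
    have hle : tpg ≤ ((m + 1 : Nat) : Int) * tpg + r := by push_cast; nlinarith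
    have hmin : min tpg (((m + 1 : Nat) : Int) * tpg + r) = tpg := by omega
    rw [hmin]
    have harg : ((m + 1 : Nat) : Int) * tpg + r - tpg = (m : Int) * tpg + r := by push_cast; ring
    rw [harg, ih r (turns ++ [tpg]) hr0 hr1 (by push_cast at hcap; simp; nlinarith)]
    rw [List.replicate_succ]
    simp

-- At-capacity regime: rem ≥ free-slots × tpg ⇒ every chunk is exactly tpg until the cap
theorem pvLoopA_cap (tpg : Int) (htpg : 0 < tpg) (cpu : Int) :
    ∀ (n : Nat) (turns : List Int) (rem : Int),
      (cpu - turns.length) = (n : Int) →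
      (n : Int) * tpg ≤ rem →
      pvLoopA cpu tpg turns rem = (turns ++ List.replicate n tpg, rem - (n : Int) * tpg) := by
  intro n
  induction n with
  | zero =>
    intro turns rem hfree _
    rw [pvLoopA, if_neg (by push_neg; intro h; omega)]
    simp
  | succ m ih =>
    intro turns rem hfree hge
    have hm0 : (0 : Int) ≤ (m : Int) := by positivity
    have hlen : (turns.length : Int) < cpu := by omega
    have hle : tpg ≤ rem := by push_cast at hge; nlinarith
    rw [pvLoopA, if_pos ⟨hlen, by omega⟩]
    have hmin : min tpg rem = tpg := by omega
    rw [hmin, ih (turns ++ [tpg]) (rem - tpg) (by simp; push_cast at hfree; omega)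
          (by push_cast at hge; nlinarith)]
    rw [List.replicate_succ, List.append_assoc]
    simp
    ring

-- ===== VERDICT (by name: the statement is the Claim_ definition above) =====
theorem calculate_all_turns_spec : Claim_equal_calculate_all_turns := by
  intro total cpu _ hpre
  unfold Spec_calculate_all_turns calculate_all_turns calculate_all_turns_alt
  obtain ⟨tpg, htpg_eq⟩ : ∃ t, t = pvTurnsPerGame total cpu := ⟨_, rfl⟩
  rw [← htpg_eq]
  have htpg : 0 < tpg := by
    have h6 : (1000000 : Int) ≤ tpg := by rw [htpg_eq]; exact le_max_left _ _
    omega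
  by_cases htriv : total ≤ 0 ∨ cpu ≤ 0
  · rw [if_pos htriv]
    have hstop : pvLoopA cpu tpg [] total = ([], total) := by
      rw [pvLoopA, if_neg (by push_neg; intro h; simp at h; omega)]
    rw [hstop]
    simp [pvLoopB]
  · rw [if_neg htriv]
    push_neg at htriv
    obtain ⟨htot', hcpu'⟩ := htriv
    have htot : 0 < total := by omega
    have hcpu : 0 < cpu := by omega
    obtain ⟨q, hq_def⟩ : ∃ x, x = PySem.Int.floordiv total tpg := ⟨_, rfl⟩
    obtain ⟨r, hr_def⟩ : ∃ x, x = PySem.Int.mod total tpg := ⟨_, rfl⟩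
    rw [← hq_def, ← hr_def]
    have hqr : q * tpg + r = total := by
      rw [hq_def, hr_def]; exact PySem.Int.floordiv_mul_add_mod total tpg
    have hr0 : 0 ≤ r := by rw [hr_def]; exact PySem.Int.mod_nonneg total htpg
    have hr1 : r < tpg := by rw [hr_def]; exact PySem.Int.mod_lt total htpg
    have hq0 : 0 ≤ q := by
      by_contra h
      push_neg at h
      nlinarith
    by_cases hcase : q < cpu
    · rw [if_pos hcase]
      have hqnat : ((q.toNat : Nat) : Int) = q := by omega
      have harg : total = ((q.toNat : Nat) : Int) * tpg + r := by rw [hqnat]; omega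
      rw [harg, pvLoopA_under tpg htpg cpu q.toNat r []
            hr0 hr1 (by simp only [List.length_nil, Nat.cast_zero, sub_zero]; rw [hqnat]; nlinarith)]
      simp [pvLoopB_zero]
    · rw [if_neg hcase]
      push_neg at hcase
      have hge : cpu * tpg ≤ total := by nlinarith
      have hcn : ((cpu.toNat : Nat) : Int) = cpu := by omega
      have hfree : cpu - ((([] : List Int).length : Nat) : Int) = ((cpu.toNat : Nat) : Int) := by
        simp only [List.length_nil, Nat.cast_zero, sub_zero]
        omega
      have hge' : ((cpu.toNat : Nat) : Int) * tpg ≤ total := by rw [hcn]; exact hge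
      rw [pvLoopA_cap tpg htpg cpu cpu.toNat [] total hfree hge', hcn]
      -- extra = total - cpu·tpg is < cpu: with d = total//cpu, m = total%cpu, d ≤ tpg and m < cpu
      have hd : PySem.Int.floordiv total cpu * cpu + PySem.Int.mod total cpu = total :=
        PySem.Int.floordiv_mul_add_mod total cpu
      have hm0 : 0 ≤ PySem.Int.mod total cpu := PySem.Int.mod_nonneg total hcpu
      have hm1 : PySem.Int.mod total cpu < cpu := PySem.Int.mod_lt total hcpu
      have hdle : PySem.Int.floordiv total cpu ≤ tpg := by
        rw [htpg_eq]; exact le_max_right _ _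
      have hextra_lt : total - cpu * tpg < cpu := by nlinarith
      have hextra_ge : 0 ≤ total - cpu * tpg := by omega
      rw [List.nil_append,
        pvLoopB_replicate cpu.toNat tpg (total - cpu * tpg) hextra_ge (by omega)]
      have hcnt : cpu.toNat - (total - cpu * tpg).toNat = (cpu - (total - cpu * tpg)).toNat := by
        omega
      rw [hcnt]
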